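-- pv_equiv track=rewrite | github.com/qe-team/marmot | marmot/features/word2vec_feature_extractor.py | left_context
-- ===== SOURCE A (Python) =====
-- def left_context(token_list, token, context_size, idx):
--     left_window = []
--     if idx <= 0:
--         #return ['_START_' for i in range(context_size)]
--         return ['<s>' for i in range(context_size)]
--     assert(token_list[idx] == token)
--     for i in range(idx-context_size, idx):
--         if i < 0:
--             #left_window.append('_START_')
--             left_window.append('<s>')
--         else:
--             left_window.append(token_list[i])
--     return left_window
-- ===== SOURCE B (Python) =====
-- def left_context(token_list, token, context_size, idx):
--     if idx <= 0:
--         return ['<s>'] * context_size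
--     assert token_list[idx] == token
--     pad = max(0, context_size - idx)
--     return ['<s>'] * pad + token_list[max(0, idx - context_size):idx]
-- ===== Notes on version B (the rewrite author's own statement) =====
-- stated objective: simpler
-- what changed: B replaces A's per-element loop with a branch inside by computing the padding count arithmetically (max(0, context_size-idx)) and taking one list slice.
import Mathlib
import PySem

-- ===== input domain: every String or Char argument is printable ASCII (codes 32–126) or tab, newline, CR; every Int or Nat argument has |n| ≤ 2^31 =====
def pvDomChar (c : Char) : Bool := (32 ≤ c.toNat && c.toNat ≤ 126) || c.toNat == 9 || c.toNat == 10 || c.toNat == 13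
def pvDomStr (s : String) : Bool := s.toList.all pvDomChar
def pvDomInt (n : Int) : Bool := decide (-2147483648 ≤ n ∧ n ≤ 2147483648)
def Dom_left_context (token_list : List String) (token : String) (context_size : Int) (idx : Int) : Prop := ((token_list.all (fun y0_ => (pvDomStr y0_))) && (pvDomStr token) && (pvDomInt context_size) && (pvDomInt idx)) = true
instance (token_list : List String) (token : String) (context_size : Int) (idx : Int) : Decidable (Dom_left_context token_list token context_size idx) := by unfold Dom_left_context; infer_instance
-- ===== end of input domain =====

-- B computes the '<s>' padding count arithmetically and takes one slice instead of A's per-element loop with a branch; same cost, simpler.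

-- ===== PORT A =====
def left_context (token_list : List String) (token : String) (context_size : Int) (idx : Int) : List String :=
  -- left_window = []; if idx <= 0: return ['<s>' for i in range(context_size)]
  if idx ≤ 0 then
    (PySem.List.pyRange 0 context_size 1).map (fun _ => "<s>")
  else
    -- assert token_list[idx] == token  (Pre_ admits exactly the inputs where it passes); then the for-loop
    (PySem.List.pyRange (idx - context_size) idx 1).foldl
      (fun left_window i =>
        if i < 0 then left_window ++ ["<s>"]
        else left_window ++ [PySem.List.pyGetD token_list i ""]) []

-- ===== PORT B =====
def left_context_alt (token_list : List String) (token : String) (context_size : Int) (idx : Int) : List String :=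
  if idx ≤ 0 then
    List.replicate context_size.toNat "<s>"
  else
    -- assert token_list[idx] == token  (same guard as A; Pre_ admits exactly the passing inputs)
    List.replicate (max 0 (context_size - idx)).toNat "<s>"
      ++ PySem.List.slice token_list (some (max 0 (idx - context_size))) (some idx)

-- ===== PRECONDITION & SPEC =====
-- Pre_ excludes exactly the inputs where A (and B) raise: idx > 0 with idx out of range
-- (IndexError) or token_list[idx] ≠ token (AssertionError).
def Pre_left_context (token_list : List String) (token : String) (context_size : Int) (idx : Int) : Prop :=
  idx ≤ 0 ∨ (idx < (token_list.length : Int) ∧ token_list.getD idx.toNat "" = token)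
instance (token_list : List String) (token : String) (context_size : Int) (idx : Int) : Decidable (Pre_left_context token_list token context_size idx) := by unfold Pre_left_context; infer_instance

def pvWitness_left_context : List String × String × Int × Int := (["a", "b", "c"], "b", 2, 1)

def Spec_left_context (token_list : List String) (token : String) (context_size : Int) (idx : Int) (out : List String) : Prop := out = left_context_alt token_list token context_size idx
instance (token_list : List String) (token : String) (context_size : Int) (idx : Int) (out : List String) : Decidable (Spec_left_context token_list token context_size idx out) := by unfold Spec_left_context; infer_instance

-- ===== CLAIM (what is proved, stated in full; the proofs are below) =====
def Claim_equal_left_context : Prop := ∀ (token_list : List String) (token : String) (context_size : Int) (idx : Int), Dom_left_context token_list token context_size idx → Pre_left_context token_list token context_size idx → Spec_left_context token_list token context_size idx (left_context token_list token context_size idx)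

-- ===== LEMMAS AND PROOFS =====

-- A's loop body appends one element per step, so the foldl is a map.
theorem foldl_append_one {α β : Type} (l : List α) (f : α → β) :
    ∀ (init : List β), l.foldl (fun acc i => acc ++ [f i]) init = init ++ l.map f := by
  induction l with
  | nil => intro init; simp
  | cons x xs ih => intro init; simp [List.foldl, ih]

-- a range entirely below 0 maps to padding
theorem map_pad (a m : Int) (f : Int → String)
    (hf : ∀ i : Int, a ≤ i → i < m → f i = "<s>") :
    (PySem.List.pyRange a m 1).map f = List.replicate (m - a).toNat "<s>" := by
  rw [List.eq_replicate_iff]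
  constructor
  · simp [PySem.List.length_pyRange_one]
  · intro b hb
    obtain ⟨i, hi, rfl⟩ := List.mem_map.mp hb
    have := (PySem.List.mem_pyRange_one).mp hi
    exact hf i (by omega) (by omega)

-- a nonnegative range below the length maps via pyGetD to drop/take
theorem map_get (tl : List String) (n : Nat) :
    ∀ (m : Int), 0 ≤ m → m + n ≤ (tl.length : Int) →
    (PySem.List.pyRange m (m + n) 1).map (fun i => PySem.List.pyGetD tl i "") =
      (tl.drop m.toNat).take n := by
  induction n with
  | zero =>
    intro m hm _
    simp
  | succ n ih =>
    intro m hm hlen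
    rw [PySem.List.pyRange_one_cons (by omega : m < m + ((n+1 : Nat) : Int))]
    have hml : m.toNat < tl.length := by omega
    have h1 : m + ((n+1 : Nat) : Int) = (m + 1) + (n : Int) := by push_cast; ring
    rw [List.map_cons, h1, ih (m+1) (by omega) (by push_cast at hlen ⊢; omega)]
    rw [List.drop_eq_getElem_cons hml, List.take_succ_cons,
        PySem.List.pyGetD_eq_getElem tl "" hm (by omega)]
    have : (m + 1).toNat = m.toNat + 1 := by omega
    rw [this]

theorem left_context_eq (token_list : List String) (token : String) (context_size : Int) (idx : Int)
    (hpre : Pre_left_context token_list token context_size idx) :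
    left_context token_list token context_size idx = left_context_alt token_list token context_size idx := by
  unfold left_context left_context_alt
  by_cases h0 : idx ≤ 0
  · simp only [if_pos h0]
    rw [List.eq_replicate_iff]
    constructor
    · simp [PySem.List.length_pyRange_one]
    · intro b hb
      obtain ⟨i, _, rfl⟩ := List.mem_map.mp hb
      rfl
  · simp only [if_neg h0]
    rcases hpre with h | ⟨hlt, _⟩
    · exact absurd h h0
    have hidx : 0 < idx := by omega
    set f : Int → String := fun i => if i < 0 then "<s>" else PySem.List.pyGetD token_list i "" with hfdef
    have hbody : (fun (acc : List String) (i : Int) =>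
        if i < 0 then acc ++ ["<s>"] else acc ++ [PySem.List.pyGetD token_list i ""]) =
        (fun acc i => acc ++ [f i]) := by
      funext acc i; by_cases hi : i < 0 <;> simp [hfdef, hi]
    rw [hbody, foldl_append_one, List.nil_append]
    set a := idx - context_size with ha
    set m := max 0 a with hm
    have ham : a ≤ m := le_max_right _ _
    have hm0 : 0 ≤ m := le_max_left _ _
    by_cases hcs : context_size ≤ 0
    · -- empty range, empty result on both sides
      rw [PySem.List.pyRange_one_eq_nil (by omega : idx ≤ a)]
      rw [PySem.List.slice_toNat token_list hm0 (by omega)]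
      have h1 : (max 0 (context_size - idx)).toNat = 0 := by omega
      have h2 : idx.toNat - m.toNat = 0 := by omega
      simp [h1, h2]
    · have hmi : m ≤ idx := by omega
      rw [PySem.List.pyRange_one_append a m idx ham hmi, List.map_append]
      congr 1
      · rw [map_pad a m f (fun i hai him => by
          simp [hfdef, show i < 0 by simp only [hm] at him; omega])]
        simp only [hm, ha]
        congr 1; omega
      · rw [List.map_congr_left (fun i hi => by
          have h := (PySem.List.mem_pyRange_one).mp hi
          show f i = PySem.List.pyGetD token_list i ""
          simp [hfdef, show ¬ i < 0 by omega])]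
        rw [show idx = m + (((idx - m).toNat : Nat) : Int) by omega]
        rw [map_get token_list (idx - m).toNat m hm0 (by omega)]
        rw [PySem.List.slice_toNat token_list hm0 (by omega)]
        congr 1
        omega

-- ===== VERDICT (by name: the statement is the Claim_ definition above) =====
theorem left_context_spec : Claim_equal_left_context := by
  intro token_list token context_size idx _ hpre
  exact left_context_eq token_list token context_size idx hpre
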